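-- pv_equiv track=rewrite | github.com/blecx/AI-Agent-Framework | scripts/next-issue.py | _extract_phase
-- ===== SOURCE A (Python) =====
-- def _extract_phase(content: str, issue_num: int) -> str:
--     """Extract phase for an issue"""
--     phases = {
--         (24, 29): "Phase 1: Infrastructure",
--         (59, 59): "Phase 2: Chat Integration",
--         (30, 36): "Phase 3: RAID Components",
--         (37, 42): "Phase 4: Workflow Components",
--         (43, 45): "Phase 5: Project Management",
--         (46, 51): "Phase 6: UX & Polish",
--         (52, 55): "Phase 7: Testing",
--         (56, 58): "Phase 8: Documentation"
--     }
--
--     for (start, end), phase_name in phases.items():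
--         if start <= issue_num <= end:
--             return phase_name
--     return "Unknown"
-- ===== SOURCE B (Python) =====
-- def _extract_phase(content: str, issue_num: int) -> str:
--     """Extract phase for an issue"""
--     phases = {
--         (24, 29): "Phase 1: Infrastructure",
--         (59, 59): "Phase 2: Chat Integration",
--         (30, 36): "Phase 3: RAID Components",
--         (37, 42): "Phase 4: Workflow Components",
--         (43, 45): "Phase 5: Project Management",
--         (46, 51): "Phase 6: UX & Polish",
--         (52, 55): "Phase 7: Testing",
--         (56, 58): "Phase 8: Documentation"
--     }
--     phase_map = {}
--     for (start, end), name in phases.items():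
--         for n in range(start, end + 1):
--             phase_map[n] = name
--     return phase_map.get(issue_num, "Unknown")
-- ===== Notes on version B (the rewrite author's own statement) =====
-- stated objective: idiomatic
-- what changed: Replaces the linear scan over (start,end) ranges with interval tests by a precomputed expanded number-to-phase dict built once, followed by a single direct lookup with a default.
import Mathlib
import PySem

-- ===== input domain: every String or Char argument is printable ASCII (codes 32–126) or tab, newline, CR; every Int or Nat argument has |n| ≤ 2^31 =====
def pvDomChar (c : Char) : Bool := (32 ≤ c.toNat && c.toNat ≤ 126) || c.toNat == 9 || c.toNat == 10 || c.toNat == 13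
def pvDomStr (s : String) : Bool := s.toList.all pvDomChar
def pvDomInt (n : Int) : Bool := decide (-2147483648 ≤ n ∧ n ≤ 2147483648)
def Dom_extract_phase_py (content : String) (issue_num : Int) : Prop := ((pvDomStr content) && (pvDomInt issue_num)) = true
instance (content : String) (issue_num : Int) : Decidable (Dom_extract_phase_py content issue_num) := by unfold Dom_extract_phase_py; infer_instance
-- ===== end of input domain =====

-- B builds the expanded number→phase table once and does a single dict lookup; A scans the ranges.

-- ===== PORT A =====
-- the phases dict of A, in insertion order
def pvPhases : List ((Int × Int) × String) :=
  [((24, 29), "Phase 1: Infrastructure"),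
   ((59, 59), "Phase 2: Chat Integration"),
   ((30, 36), "Phase 3: RAID Components"),
   ((37, 42), "Phase 4: Workflow Components"),
   ((43, 45), "Phase 5: Project Management"),
   ((46, 51), "Phase 6: UX & Polish"),
   ((52, 55), "Phase 7: Testing"),
   ((56, 58), "Phase 8: Documentation")]

-- the for-loop with early return of A
def pvScan (items : List ((Int × Int) × String)) (issue_num : Int) : String :=
  match items with
  | [] => "Unknown"
  | ((s, e), name) :: rest =>
      if s ≤ issue_num ∧ issue_num ≤ e then name else pvScan rest issue_num

def extract_phase_py (_content : String) (issue_num : Int) : String :=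
  pvScan pvPhases issue_num

-- ===== PORT B =====
-- B's table build: for each ((start,end),name) assign phase_map[n] = name for n in range(start,end+1)
def pvPhaseMap : PySem.Dict Int String :=
  pvPhases.foldl
    (fun d p =>
      (PySem.List.pyRange p.1.1 (p.1.2 + 1) 1).foldl (fun d' n => d'.insert n p.2) d)
    PySem.Dict.empty

def extract_phase_py_alt (_content : String) (issue_num : Int) : String :=
  pvPhaseMap.getD issue_num "Unknown"

-- ===== PRECONDITION & SPEC =====
def Spec_extract_phase_py (content : String) (issue_num : Int) (out : String) : Prop := out = extract_phase_py_alt content issue_num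
instance (content : String) (issue_num : Int) (out : String) : Decidable (Spec_extract_phase_py content issue_num out) := by unfold Spec_extract_phase_py; infer_instance

-- ===== CLAIM (what is proved, stated in full; the proofs are below) =====
def Claim_equal_extract_phase_py : Prop := ∀ (content : String) (issue_num : Int), Dom_extract_phase_py content issue_num → Spec_extract_phase_py content issue_num (extract_phase_py content issue_num)

-- ===== LEMMAS AND PROOFS =====

-- outside 24..59 both programs return "Unknown"
set_option maxRecDepth 8000 in
theorem pv_out_of_range (n : Int) (h : ¬ (24 ≤ n ∧ n ≤ 59)) :
    pvScan pvPhases n = "Unknown" ∧ PySem.Dict.getD pvPhaseMap n "Unknown" = "Unknown" := by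
  constructor
  · simp only [pvPhases, pvScan]
    split_ifs <;> first | rfl | omega
  · apply PySem.Dict.getD_of_get?_eq_none
    rw [PySem.Dict.get?_eq_none_iff_not_mem_keys]
    have hk : pvPhaseMap.keys = [24, 25, 26, 27, 28, 29, 59, 30, 31, 32, 33, 34, 35, 36,
        37, 38, 39, 40, 41, 42, 43, 44, 45, 46, 47, 48, 49, 50, 51, 52, 53, 54, 55, 56, 57, 58] := by
      decide
    rw [hk]
    simp only [List.mem_cons, List.not_mem_nil, or_false]
    omega

-- ===== VERDICT (by name: the statement is the Claim_ definition above) =====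
set_option maxRecDepth 8000 in
theorem extract_phase_py_spec : Claim_equal_extract_phase_py := by
  intro content n _
  unfold Spec_extract_phase_py extract_phase_py extract_phase_py_alt
  by_cases h : 24 ≤ n ∧ n ≤ 59
  · obtain ⟨h1, h2⟩ := h
    interval_cases n <;> decide
  · exact ((pv_out_of_range n h).1).trans ((pv_out_of_range n h).2).symm
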